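-- pv_equiv track=rewrite | github.com/wkbrowne/technical_dashboard | src/feature_selection/utils.py | categorize_features
-- ===== SOURCE A (Python) =====
-- from typing import Any, Dict, List, Optional, Set, Tuple, Union
--
-- def categorize_features(
--     features: List[str]
-- ) -> Dict[str, List[str]]:
--     """Categorize features by type based on naming conventions.
--
--     Args:
--         features: List of feature names.
--
--     Returns:
--         Dict mapping category to feature list.
--     """
--     categories = {
--         'momentum': [],
--         'volatility': [],
--         'volume': [],
--         'trend': [],
--         'breadth': [],
--         'cross_sectional': [],
--         'regime': [],
--         'interaction': [],
--         'other': []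
--     }
--
--     patterns = {
--         'momentum': ['rsi', 'macd', 'return', 'mom', 'roc'],
--         'volatility': ['vol', 'atr', 'vix', 'std'],
--         'volume': ['volume', 'vol_ratio', 'obv'],
--         'trend': ['ma_', 'slope', 'trend', 'sma', 'ema'],
--         'breadth': ['breadth', 'advance', 'decline', 'high_low'],
--         'cross_sectional': ['rank', 'pct', 'xsec', 'relative', 'alpha'],
--         'regime': ['regime', 'state', 'phase'],
--         'interaction': ['_x_', '_AND_', '_div_'],
--     }
--
--     for f in features:
--         f_lower = f.lower()
--         categorized = False
--
--         for category, keywords in patterns.items():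
--             if any(kw in f_lower for kw in keywords):
--                 categories[category].append(f)
--                 categorized = True
--                 break
--
--         if not categorized:
--             categories['other'].append(f)
--
--     return categories
-- ===== SOURCE B (Python) =====
-- from typing import Dict, List
--
-- _PATTERNS = [
--     ('momentum', ['rsi', 'macd', 'return', 'mom', 'roc']),
--     ('volatility', ['vol', 'atr', 'vix', 'std']),
--     ('volume', ['volume', 'vol_ratio', 'obv']),
--     ('trend', ['ma_', 'slope', 'trend', 'sma', 'ema']),
--     ('breadth', ['breadth', 'advance', 'decline', 'high_low']),
--     ('cross_sectional', ['rank', 'pct', 'xsec', 'relative', 'alpha']),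
--     ('regime', ['regime', 'state', 'phase']),
--     ('interaction', ['_x_', '_AND_', '_div_']),
-- ]
--
-- def categorize_features(features: List[str]) -> Dict[str, List[str]]:
--     """Category-major traversal: for each category in priority order, claim
--     (by index) the not-yet-claimed features matching its keywords; the rest go
--     to 'other'."""
--     result = {name: [] for name, _ in _PATTERNS}
--     result['other'] = []
--     claimed = set()
--     for name, keywords in _PATTERNS:
--         bucket = []
--         for i, f in enumerate(features):
--             if i not in claimed and any(kw in f.lower() for kw in keywords):
--                 bucket.append(f)
--                 claimed.add(i)
--         result[name] = bucket
--     result['other'] = [f for i, f in enumerate(features) if i not in claimed]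
--     return result
-- ===== Notes on version B (the rewrite author's own statement) =====
-- stated objective: alternative
-- what changed: Flipped the feature-major loop with an inner break over pattern categories into a category-major traversal: each category in priority order scans the feature list and claims unclaimed indices, and 'other' collects the never-claimed indices at the end.
import Mathlib
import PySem

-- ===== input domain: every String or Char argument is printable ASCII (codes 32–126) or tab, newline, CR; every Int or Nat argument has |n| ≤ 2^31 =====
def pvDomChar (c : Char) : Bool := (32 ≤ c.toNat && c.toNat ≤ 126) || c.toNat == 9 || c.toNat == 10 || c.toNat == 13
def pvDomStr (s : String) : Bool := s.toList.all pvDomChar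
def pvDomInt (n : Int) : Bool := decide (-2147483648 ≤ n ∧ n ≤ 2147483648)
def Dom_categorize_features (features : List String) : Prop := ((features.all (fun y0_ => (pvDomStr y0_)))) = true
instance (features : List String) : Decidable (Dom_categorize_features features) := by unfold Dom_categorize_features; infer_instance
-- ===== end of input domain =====

-- B replaces A's feature-major loop (inner break over categories) by a category-major
-- traversal that claims feature indices; same return value, no speed claim.

-- the category/keyword table both Pythons carry
def pvPatterns : List (String × List String) :=
  [("momentum", ["rsi", "macd", "return", "mom", "roc"]),
   ("volatility", ["vol", "atr", "vix", "std"]),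
   ("volume", ["volume", "vol_ratio", "obv"]),
   ("trend", ["ma_", "slope", "trend", "sma", "ema"]),
   ("breadth", ["breadth", "advance", "decline", "high_low"]),
   ("cross_sectional", ["rank", "pct", "xsec", "relative", "alpha"]),
   ("regime", ["regime", "state", "phase"]),
   ("interaction", ["_x_", "_AND_", "_div_"])]

-- ===== PORT A =====
-- any(kw in f_lower for kw in keywords)
def pvMatches (fl : String) (kws : List String) : Bool :=
  kws.any (fun kw => PySem.Str.isIn kw fl)

-- A's inner for-loop with break / the 'categorized' flag: first matching category, else 'other'
def pvCatOf (f : String) : String :=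
  match pvPatterns.find? (fun p => pvMatches (PySem.Str.lower f) p.2) with
  | some p => p.1
  | none => "other"

-- the literal 'categories' dict initializer of A
def pvCats0 : PySem.Dict String (List String) :=
  ((((((((PySem.Dict.empty.insert "momentum" []).insert "volatility" []).insert
      "volume" []).insert "trend" []).insert "breadth" []).insert
      "cross_sectional" []).insert "regime" []).insert "interaction" []).insert "other" []

def categorize_features (features : List String) : List (String × List String) :=
  (features.foldl (fun d f => d.modify (pvCatOf f) [] (fun l => l ++ [f])) pvCats0).items

-- ===== PORT B =====
-- B's inner loop body: claim index i for this category if unclaimed and matching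
def pvInner (kws : List String) (st : List String × PySem.Set Int) (p : Int × String) :
    List String × PySem.Set Int :=
  if !st.2.contains p.1 && pvMatches (PySem.Str.lower p.2) kws then
    (st.1 ++ [p.2], st.2.add p.1)
  else st

-- B's outer loop body: scan the features for one category, then store its bucket
def pvOuter (features : List String) (st : PySem.Dict String (List String) × PySem.Set Int)
    (q : String × List String) : PySem.Dict String (List String) × PySem.Set Int :=
  let r := (PySem.List.enumerate features 0).foldl (pvInner q.2) ([], st.2)
  (st.1.insert q.1 r.1, r.2)

def categorize_features_alt (features : List String) : List (String × List String) :=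
  let r0 := (pvPatterns.foldl (fun d q => d.insert q.1 ([] : List String))
      PySem.Dict.empty).insert "other" []
  let r := pvPatterns.foldl (pvOuter features) (r0, PySem.Set.empty)
  (r.1.insert "other"
      (((PySem.List.enumerate features 0).filter (fun p => !r.2.contains p.1)).map (·.2))).items

-- ===== PRECONDITION & SPEC =====
def Spec_categorize_features (features : List String) (out : List (String × List String)) : Prop := out = categorize_features_alt features
instance (features : List String) (out : List (String × List String)) : Decidable (Spec_categorize_features features out) := by unfold Spec_categorize_features; infer_instance

-- ===== CLAIM (what is proved, stated in full; the proofs are below) =====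
def Claim_equal_categorize_features : Prop := ∀ (features : List String), Dom_categorize_features features → Spec_categorize_features features (categorize_features features)

-- ===== LEMMAS AND PROOFS =====

def pvNineKeys : List String :=
  ["momentum", "volatility", "volume", "trend", "breadth", "cross_sectional",
   "regime", "interaction", "other"]

def pvPrevOr (prev : String → Bool) (kws : List String) : String → Bool :=
  fun f => prev f || pvMatches (PySem.Str.lower f) kws

def pvBuckets (features : List String) (prev : String → Bool) :
    List (String × List String) → List (String × List String)
  | [] => []
  | q :: t =>
      (q.1, features.filter (fun f => !prev f && pvMatches (PySem.Str.lower f) q.2)) ::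
        pvBuckets features (pvPrevOr prev q.2) t

def pvPrevAll (prev : String → Bool) : List (String × List String) → (String → Bool)
  | [] => prev
  | q :: t => pvPrevAll (pvPrevOr prev q.2) t

lemma pv_notmem_enum {t : List String} {s : Int} {p : Int × String}
    (hp : p ∈ PySem.List.enumerate t (s+1)) : p.1 ≠ s := by
  rw [PySem.List.mem_enumerate_iff] at hp
  obtain ⟨k, hk, rfl⟩ := hp
  simp; omega

lemma pv_contains_add {cl : PySem.Set Int} {s j : Int} (hne : j ≠ s) :
    (cl.add s).contains j = cl.contains j := by
  by_cases hm : j ∈ cl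
  · rw [(PySem.Set.contains_iff cl j).2 hm,
      (PySem.Set.contains_iff (cl.add s) j).2 ((PySem.Set.mem_add cl s j).2 (Or.inl hm))]
  · have hna : j ∉ cl.add s := fun hmem => by
      rcases (PySem.Set.mem_add cl s j).1 hmem with h | h
      · exact hm h
      · exact hne h
    rw [Bool.eq_false_iff.2 (fun hc2 => hm ((PySem.Set.contains_iff cl j).1 hc2)),
      Bool.eq_false_iff.2 (fun hc2 => hna ((PySem.Set.contains_iff (cl.add s) j).1 hc2))]

lemma pvInner_fst (kws : List String) :
    ∀ (xs : List String) (s : Int) (b : List String) (cl : PySem.Set Int),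
    ((PySem.List.enumerate xs s).foldl (pvInner kws) (b, cl)).1 =
      b ++ ((PySem.List.enumerate xs s).filter
        (fun p => !cl.contains p.1 && pvMatches (PySem.Str.lower p.2) kws)).map (·.2) := by
  intro xs
  induction xs with
  | nil => intro s b cl; simp [PySem.List.enumerate]
  | cons x t ih =>
    intro s b cl
    rw [PySem.List.enumerate_cons, List.foldl_cons, List.filter_cons]
    have hcong : ∀ cl' : PySem.Set Int,
        (PySem.List.enumerate t (s+1)).filter
          (fun p => !(cl.add s).contains p.1 && pvMatches (PySem.Str.lower p.2) kws) =
        (PySem.List.enumerate t (s+1)).filter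
          (fun p => !cl.contains p.1 && pvMatches (PySem.Str.lower p.2) kws) := by
      intro _
      exact List.filter_congr (fun p hp => by rw [pv_contains_add (pv_notmem_enum hp)])
    by_cases hc : (!cl.contains s && pvMatches (PySem.Str.lower x) kws) = true
    · have hstep : pvInner kws (b, cl) (s, x) = (b ++ [x], cl.add s) := by
        simp only [pvInner]; rw [if_pos hc]
      rw [hstep, if_pos hc, ih (s+1) (b ++ [x]) (cl.add s), hcong cl]
      simp
    · have hstep : pvInner kws (b, cl) (s, x) = (b, cl) := by
        simp only [pvInner]; rw [if_neg hc]
      rw [hstep, if_neg hc, ih (s+1) b cl]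

lemma pvInner_snd (kws : List String) :
    ∀ (xs : List String) (s : Int) (b : List String) (cl : PySem.Set Int) (j : Int),
    (j ∈ ((PySem.List.enumerate xs s).foldl (pvInner kws) (b, cl)).2) ↔
      (j ∈ cl ∨ ∃ p ∈ PySem.List.enumerate xs s, p.1 = j ∧
        pvMatches (PySem.Str.lower p.2) kws = true) := by
  intro xs
  induction xs with
  | nil => intro s b cl j; simp [PySem.List.enumerate]
  | cons x t ih =>
    intro s b cl j
    rw [PySem.List.enumerate_cons, List.foldl_cons]
    by_cases hc : (!cl.contains s && pvMatches (PySem.Str.lower x) kws) = true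
    · have hstep : pvInner kws (b, cl) (s, x) = (b ++ [x], cl.add s) := by
        simp only [pvInner]; rw [if_pos hc]
      rw [hstep, ih (s+1) (b ++ [x]) (cl.add s) j]
      rw [PySem.Set.mem_add]
      have hc' := hc
      simp only [Bool.and_eq_true, Bool.not_eq_true'] at hc'
      simp only [List.mem_cons]
      constructor
      · rintro ((h | rfl) | ⟨p, hp, h1, h2⟩)
        · exact Or.inl h
        · exact Or.inr ⟨(j, x), Or.inl rfl, rfl, hc'.2⟩
        · exact Or.inr ⟨p, Or.inr hp, h1, h2⟩
      · rintro (h | ⟨p, (rfl | hp), h1, h2⟩)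
        · exact Or.inl (Or.inl h)
        · exact Or.inl (Or.inr h1.symm)
        · exact Or.inr ⟨p, hp, h1, h2⟩
    · have hstep : pvInner kws (b, cl) (s, x) = (b, cl) := by
        simp only [pvInner]; rw [if_neg hc]
      rw [hstep, ih (s+1) b cl j]
      simp only [List.mem_cons]
      simp only [Bool.and_eq_true, Bool.not_eq_true'] at hc
      constructor
      · rintro (h | ⟨p, hp, h1, h2⟩)
        · exact Or.inl h
        · exact Or.inr ⟨p, Or.inr hp, h1, h2⟩
      · rintro (h | ⟨p, (rfl | hp), h1, h2⟩)
        · exact Or.inl h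
        · -- p = (s, x): since condition failed, either s ∈ cl (then j = s ∈ cl) or no match
          rcases not_and_or.1 hc with h' | h'
          · left
            have hcc : cl.contains s = true := by
              cases hcs : cl.contains s
              · exact absurd hcs h'
              · rfl
            exact h1 ▸ (PySem.Set.contains_iff cl s).1 hcc
          · exact absurd h2 h'
        · exact Or.inr ⟨p, hp, h1, h2⟩

lemma pvEnum_uniq {xs : List String} {s : Int} {p q : Int × String}
    (hp : p ∈ PySem.List.enumerate xs s) (hq : q ∈ PySem.List.enumerate xs s)
    (h : p.1 = q.1) : p = q := by
  rw [PySem.List.mem_enumerate_iff] at hp hq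
  obtain ⟨k, hk, rfl⟩ := hp
  obtain ⟨k', hk', rfl⟩ := hq
  simp only at h
  have : k = k' := by omega
  subst this; rfl

lemma pvFilter_enum (xs : List String) (s : Int) (c : Int × String → Bool)
    (c' : String → Bool) (h : ∀ p ∈ PySem.List.enumerate xs s, c p = c' p.2) :
    ((PySem.List.enumerate xs s).filter c).map (·.2) = xs.filter c' := by
  induction xs generalizing s with
  | nil => simp [PySem.List.enumerate]
  | cons x t ih =>
    rw [PySem.List.enumerate_cons]
    have hx := h (s, x) (by rw [PySem.List.enumerate_cons]; exact List.mem_cons_self)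
    rw [List.filter_cons, List.filter_cons, hx]
    by_cases hc : c' x = true
    · rw [if_pos hc, if_pos hc, List.map_cons,
        ih (s+1) (fun p hp => h p (by rw [PySem.List.enumerate_cons]; exact List.mem_cons_of_mem _ hp))]
    · rw [if_neg hc, if_neg hc,
        ih (s+1) (fun p hp => h p (by rw [PySem.List.enumerate_cons]; exact List.mem_cons_of_mem _ hp))]

lemma pvOuter_spec (features : List String) :
    ∀ (ps : List (String × List String)) (prev : String → Bool)
      (cl : PySem.Set Int) (d : PySem.Dict String (List String)),
    (∀ j : Int, j ∈ cl ↔ ∃ p ∈ PySem.List.enumerate features 0, p.1 = j ∧ prev p.2 = true) →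
    (ps.foldl (pvOuter features) (d, cl)).1 =
      (pvBuckets features prev ps).foldl (fun d q => d.insert q.1 q.2) d ∧
    (∀ j : Int, j ∈ (ps.foldl (pvOuter features) (d, cl)).2 ↔
      ∃ p ∈ PySem.List.enumerate features 0, p.1 = j ∧ pvPrevAll prev ps p.2 = true) := by
  intro ps
  induction ps with
  | nil =>
    intro prev cl d hcl
    exact ⟨rfl, hcl⟩
  | cons q t ih =>
    intro prev cl d hcl
    have hcont : ∀ p ∈ PySem.List.enumerate features 0, cl.contains p.1 = prev p.2 := by
      intro p hp
      by_cases hp2 : prev p.2 = true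
      · rw [hp2, (PySem.Set.contains_iff cl p.1).2 ((hcl p.1).2 ⟨p, hp, rfl, hp2⟩)]
      · have hnm : p.1 ∉ cl := fun hm => by
          obtain ⟨q', hq', hq1, hq2⟩ := (hcl p.1).1 hm
          rw [pvEnum_uniq hq' hp hq1] at hq2
          exact hp2 hq2
        rw [Bool.eq_false_iff.2 (fun hc2 => hnm ((PySem.Set.contains_iff cl p.1).1 hc2)),
          Bool.eq_false_iff.2 hp2]
    have hr1 : ((PySem.List.enumerate features 0).foldl (pvInner q.2) ([], cl)).1 =
        features.filter (fun f => !prev f && pvMatches (PySem.Str.lower f) q.2) := by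
      rw [pvInner_fst q.2 features 0 [] cl, List.nil_append]
      exact pvFilter_enum features 0 _ _ (fun p hp => by rw [hcont p hp])
    have hr2 : ∀ j : Int, j ∈ ((PySem.List.enumerate features 0).foldl (pvInner q.2) ([], cl)).2 ↔
        ∃ p ∈ PySem.List.enumerate features 0, p.1 = j ∧ pvPrevOr prev q.2 p.2 = true := by
      intro j
      rw [pvInner_snd q.2 features 0 [] cl j]
      constructor
      · rintro (h | ⟨p, hp, h1, h2⟩)
        · obtain ⟨p, hp, h1, h2⟩ := (hcl j).1 h
          exact ⟨p, hp, h1, by simp [pvPrevOr, h2]⟩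
        · exact ⟨p, hp, h1, by simp [pvPrevOr, h2]⟩
      · rintro ⟨p, hp, h1, h2⟩
        simp only [pvPrevOr, Bool.or_eq_true] at h2
        rcases h2 with h2 | h2
        · exact Or.inl ((hcl j).2 ⟨p, hp, h1, h2⟩)
        · exact Or.inr ⟨p, hp, h1, h2⟩
    rw [List.foldl_cons]
    have hstep : pvOuter features (d, cl) q =
        (d.insert q.1 (features.filter (fun f => !prev f && pvMatches (PySem.Str.lower f) q.2)),
         ((PySem.List.enumerate features 0).foldl (pvInner q.2) ([], cl)).2) := by
      simp only [pvOuter, hr1]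
    rw [hstep]
    obtain ⟨g1, g2⟩ := ih (pvPrevOr prev q.2) _ _ hr2
    exact ⟨by rw [g1]; rfl, g2⟩

lemma pvSet_update_of_mem {s : PySem.Set String} :
    ∀ {l : List String}, (∀ x ∈ l, x ∈ s) → PySem.Set.update s l = s := by
  intro l
  induction l with
  | nil => intro _; rfl
  | cons x t ih =>
    intro h
    show PySem.Set.update (s.add x) t = s
    have : s.add x = s := by
      unfold PySem.Set.add
      rw [if_pos ((PySem.Set.contains_iff s x).2 (h x List.mem_cons_self))]
    rw [this]
    exact ih (fun y hy => h y (List.mem_cons_of_mem _ hy))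

lemma pvCatOf_mem (f : String) : pvCatOf f ∈ pvNineKeys := by
  unfold pvCatOf
  cases hf : pvPatterns.find? (fun p => pvMatches (PySem.Str.lower f) p.2) with
  | none => simp [pvNineKeys]
  | some p =>
    have hp := List.mem_of_find?_eq_some hf
    have : p.1 ∈ pvPatterns.map Prod.fst := List.mem_map_of_mem hp
    simp only [pvPatterns, List.map_cons, List.map_nil, List.mem_cons,
      List.not_mem_nil, or_false] at this
    simp only [pvNineKeys]
    rcases this with h | h | h | h | h | h | h | h <;> simp [h]

-- A's dict characterized
lemma pvA_items (features : List String) :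
    (features.foldl (fun d f => d.modify (pvCatOf f) [] (fun l => l ++ [f])) pvCats0).items =
      pvNineKeys.map (fun c => (c, features.filter (fun f => pvCatOf f == c))) := by
  have hkeys : (features.foldl (fun d f => d.modify (pvCatOf f) [] (fun l => l ++ [f])) pvCats0).keys = pvNineKeys := by
    rw [PySem.Dict.keys_foldl_modify_key features pvCatOf [] (fun _ f => (fun l => l ++ [f])) pvCats0]
    have h0 : pvCats0.keys = pvNineKeys := by decide
    rw [h0]
    exact pvSet_update_of_mem (fun x hx => by
      obtain ⟨f, _, rfl⟩ := List.mem_map.1 hx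
      exact pvCatOf_mem f)
  have hnd : (features.foldl (fun d f => d.modify (pvCatOf f) [] (fun l => l ++ [f])) pvCats0).keys.Nodup := by
    exact PySem.Dict.nodup_keys_foldl_modify_key features pvCatOf [] (fun _ f => (fun l => l ++ [f])) pvCats0 (by decide)
  rw [PySem.Dict.items_eq_map_keys _ hnd [], hkeys]
  apply List.map_congr_left
  intro c hc
  have hgd : (features.foldl (fun d f => d.modify (pvCatOf f) [] (fun l => l ++ [f])) pvCats0).getD c [] =
      features.filter (fun f => pvCatOf f == c) := by
    have hm : features.foldl (fun d f => d.modify (pvCatOf f) [] (fun l => l ++ [f])) pvCats0 =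
        (features.map (fun f => (pvCatOf f, f))).foldl (fun d p => d.modify p.1 [] (fun l => l ++ [p.2])) pvCats0 := by
      rw [List.foldl_map]
    rw [hm, PySem.Dict.getD_foldl_modify_append]
    have h0 : pvCats0.getD c [] = [] := by
      simp only [pvNineKeys, List.mem_cons, List.not_mem_nil, or_false] at hc
      rcases hc with h | h | h | h | h | h | h | h | h <;> subst h <;> decide
    rw [h0, List.nil_append, List.filter_map, List.map_map]
    simp [Function.comp_def]
  rw [hgd]

lemma pvContains_char {features : List String} {cl : PySem.Set Int} {P : String → Bool}
    (hcl : ∀ j : Int, j ∈ cl ↔ ∃ p ∈ PySem.List.enumerate features 0, p.1 = j ∧ P p.2 = true) :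
    ∀ p ∈ PySem.List.enumerate features 0, cl.contains p.1 = P p.2 := by
  intro p hp
  by_cases hp2 : P p.2 = true
  · rw [hp2, (PySem.Set.contains_iff cl p.1).2 ((hcl p.1).2 ⟨p, hp, rfl, hp2⟩)]
  · have hnm : p.1 ∉ cl := fun hm => by
      obtain ⟨q', hq', hq1, hq2⟩ := (hcl p.1).1 hm
      rw [pvEnum_uniq hq' hp hq1] at hq2
      exact hp2 hq2
    rw [Bool.eq_false_iff.2 (fun hc2 => hnm ((PySem.Set.contains_iff cl p.1).1 hc2)),
      Bool.eq_false_iff.2 hp2]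

lemma pvKeys_insert_nine {d : PySem.Dict String (List String)} (h : d.keys = pvNineKeys)
    {c : String} (v : List String) (hc : c ∈ pvNineKeys) : (d.insert c v).keys = pvNineKeys := by
  rw [PySem.Dict.keys_insert_of_contains d v ((PySem.Dict.contains_iff_mem_keys d c).2 (h ▸ hc)), h]

set_option maxHeartbeats 1000000 in
lemma pvPred_eq (f : String) :
    ((!false && pvMatches (PySem.Str.lower f) ["rsi", "macd", "return", "mom", "roc"]) = (pvCatOf f == "momentum"))
  ∧ ((!(false || pvMatches (PySem.Str.lower f) ["rsi", "macd", "return", "mom", "roc"]) && pvMatches (PySem.Str.lower f) ["vol", "atr", "vix", "std"]) = (pvCatOf f == "volatility"))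
  ∧ ((!(false || pvMatches (PySem.Str.lower f) ["rsi", "macd", "return", "mom", "roc"] || pvMatches (PySem.Str.lower f) ["vol", "atr", "vix", "std"]) && pvMatches (PySem.Str.lower f) ["volume", "vol_ratio", "obv"]) = (pvCatOf f == "volume"))
  ∧ ((!(false || pvMatches (PySem.Str.lower f) ["rsi", "macd", "return", "mom", "roc"] || pvMatches (PySem.Str.lower f) ["vol", "atr", "vix", "std"] || pvMatches (PySem.Str.lower f) ["volume", "vol_ratio", "obv"]) && pvMatches (PySem.Str.lower f) ["ma_", "slope", "trend", "sma", "ema"]) = (pvCatOf f == "trend"))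
  ∧ ((!(false || pvMatches (PySem.Str.lower f) ["rsi", "macd", "return", "mom", "roc"] || pvMatches (PySem.Str.lower f) ["vol", "atr", "vix", "std"] || pvMatches (PySem.Str.lower f) ["volume", "vol_ratio", "obv"] || pvMatches (PySem.Str.lower f) ["ma_", "slope", "trend", "sma", "ema"]) && pvMatches (PySem.Str.lower f) ["breadth", "advance", "decline", "high_low"]) = (pvCatOf f == "breadth"))
  ∧ ((!(false || pvMatches (PySem.Str.lower f) ["rsi", "macd", "return", "mom", "roc"] || pvMatches (PySem.Str.lower f) ["vol", "atr", "vix", "std"] || pvMatches (PySem.Str.lower f) ["volume", "vol_ratio", "obv"] || pvMatches (PySem.Str.lower f) ["ma_", "slope", "trend", "sma", "ema"] || pvMatches (PySem.Str.lower f) ["breadth", "advance", "decline", "high_low"]) && pvMatches (PySem.Str.lower f) ["rank", "pct", "xsec", "relative", "alpha"]) = (pvCatOf f == "cross_sectional"))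
  ∧ ((!(false || pvMatches (PySem.Str.lower f) ["rsi", "macd", "return", "mom", "roc"] || pvMatches (PySem.Str.lower f) ["vol", "atr", "vix", "std"] || pvMatches (PySem.Str.lower f) ["volume", "vol_ratio", "obv"] || pvMatches (PySem.Str.lower f) ["ma_", "slope", "trend", "sma", "ema"] || pvMatches (PySem.Str.lower f) ["breadth", "advance", "decline", "high_low"] || pvMatches (PySem.Str.lower f) ["rank", "pct", "xsec", "relative", "alpha"]) && pvMatches (PySem.Str.lower f) ["regime", "state", "phase"]) = (pvCatOf f == "regime"))
  ∧ ((!(false || pvMatches (PySem.Str.lower f) ["rsi", "macd", "return", "mom", "roc"] || pvMatches (PySem.Str.lower f) ["vol", "atr", "vix", "std"] || pvMatches (PySem.Str.lower f) ["volume", "vol_ratio", "obv"] || pvMatches (PySem.Str.lower f) ["ma_", "slope", "trend", "sma", "ema"] || pvMatches (PySem.Str.lower f) ["breadth", "advance", "decline", "high_low"] || pvMatches (PySem.Str.lower f) ["rank", "pct", "xsec", "relative", "alpha"] || pvMatches (PySem.Str.lower f) ["regime", "state", "phase"]) && pvMatches (PySem.Str.lower f) ["_x_", "_AND_", "_div_"])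 = (pvCatOf f == "interaction"))
  ∧ ((!(false || pvMatches (PySem.Str.lower f) ["rsi", "macd", "return", "mom", "roc"] || pvMatches (PySem.Str.lower f) ["vol", "atr", "vix", "std"] || pvMatches (PySem.Str.lower f) ["volume", "vol_ratio", "obv"] || pvMatches (PySem.Str.lower f) ["ma_", "slope", "trend", "sma", "ema"] || pvMatches (PySem.Str.lower f) ["breadth", "advance", "decline", "high_low"] || pvMatches (PySem.Str.lower f) ["rank", "pct", "xsec", "relative", "alpha"] || pvMatches (PySem.Str.lower f) ["regime", "state", "phase"] || pvMatches (PySem.Str.lower f) ["_x_", "_AND_", "_div_"])) = (pvCatOf f == "other")) := by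
  cases h1 : pvMatches (PySem.Str.lower f) ["rsi", "macd", "return", "mom", "roc"] <;>
  cases h2 : pvMatches (PySem.Str.lower f) ["vol", "atr", "vix", "std"] <;>
  cases h3 : pvMatches (PySem.Str.lower f) ["volume", "vol_ratio", "obv"] <;>
  cases h4 : pvMatches (PySem.Str.lower f) ["ma_", "slope", "trend", "sma", "ema"] <;>
  cases h5 : pvMatches (PySem.Str.lower f) ["breadth", "advance", "decline", "high_low"] <;>
  cases h6 : pvMatches (PySem.Str.lower f) ["rank", "pct", "xsec", "relative", "alpha"] <;>
  cases h7 : pvMatches (PySem.Str.lower f) ["regime", "state", "phase"] <;>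
  cases h8 : pvMatches (PySem.Str.lower f) ["_x_", "_AND_", "_div_"] <;>
    simp [pvCatOf, pvPatterns, List.find?, h1, h2, h3, h4, h5, h6, h7, h8]

lemma pvB_items (features : List String) :
    categorize_features_alt features =
      pvNineKeys.map (fun c => (c,
        features.filter (fun f => pvCatOf f == c))) := by
  have hcl0 : ∀ j : Int, j ∈ (PySem.Set.empty : PySem.Set Int) ↔
      ∃ p ∈ PySem.List.enumerate features 0, p.1 = j ∧ (fun (_ : String) => false) p.2 = true := by
    simp [PySem.Set.empty]
  have hR0 : ((pvPatterns.foldl (fun d q => d.insert q.1 ([] : List String))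
      PySem.Dict.empty).insert "other" []).keys = pvNineKeys := by decide
  obtain ⟨h1, h2⟩ := pvOuter_spec features pvPatterns (fun _ => false) PySem.Set.empty
    ((pvPatterns.foldl (fun d q => d.insert q.1 ([] : List String))
      PySem.Dict.empty).insert "other" []) hcl0
  have hdef : categorize_features_alt features =
      ((pvPatterns.foldl (pvOuter features)
          (((pvPatterns.foldl (fun d q => d.insert q.1 ([] : List String))
            PySem.Dict.empty).insert "other" []), PySem.Set.empty)).1.insert "other"
        (((PySem.List.enumerate features 0).filter
          (fun p => !(pvPatterns.foldl (pvOuter features)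
          (((pvPatterns.foldl (fun d q => d.insert q.1 ([] : List String))
            PySem.Dict.empty).insert "other" []), PySem.Set.empty)).2.contains p.1)).map (·.2))).items := rfl
  rw [hdef, h1]
  rw [pvFilter_enum features 0 _ (fun f => !(pvPrevAll (fun _ => false) pvPatterns f))
    (fun p hp => by rw [pvContains_char h2 p hp])]
  have hbf : ∀ (ps : List (String × List String)) (prev : String → Bool),
      (pvBuckets features prev ps).map Prod.fst = ps.map Prod.fst := by
    intro ps
    induction ps with
    | nil => intro _; rfl
    | cons q t ih => intro prev; simp only [pvBuckets, List.map_cons, ih]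
  have hk : ((pvBuckets features (fun _ => false) pvPatterns).foldl
      (fun d q => d.insert q.1 q.2)
      ((pvPatterns.foldl (fun d q => d.insert q.1 ([] : List String))
        PySem.Dict.empty).insert "other" [])).keys = pvNineKeys := by
    rw [PySem.Dict.keys_foldl_insert_key _ Prod.fst (fun _ q => q.2) _, hR0, hbf]
    exact pvSet_update_of_mem (by decide)
  have hkB := pvKeys_insert_nine hk
    (features.filter (fun f => !(pvPrevAll (fun _ => false) pvPatterns f)))
    (by decide : "other" ∈ pvNineKeys)
  rw [PySem.Dict.items_eq_map_keys _ (hkB ▸ (by decide : pvNineKeys.Nodup)) [], hkB]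
  apply List.map_congr_left
  simp only [pvNineKeys, List.mem_cons, List.not_mem_nil, or_false]
  rintro c (rfl | rfl | rfl | rfl | rfl | rfl | rfl | rfl | rfl) <;>
    simp only [pvPatterns, pvBuckets, pvPrevOr, pvPrevAll, List.foldl_cons, List.foldl_nil] <;>
    simp only [PySem.Dict.getD_insert, reduceIte, Prod.mk.injEq, true_and] <;>
    refine List.filter_congr (fun f _ => ?_)
  · exact (pvPred_eq f).1
  · exact (pvPred_eq f).2.1
  · exact (pvPred_eq f).2.2.1
  · exact (pvPred_eq f).2.2.2.1
  · exact (pvPred_eq f).2.2.2.2.1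
  · exact (pvPred_eq f).2.2.2.2.2.1
  · exact (pvPred_eq f).2.2.2.2.2.2.1
  · exact (pvPred_eq f).2.2.2.2.2.2.2.1
  · exact (pvPred_eq f).2.2.2.2.2.2.2.2

theorem pv_main (features : List String) :
    categorize_features features = categorize_features_alt features := by
  rw [pvB_items features]
  exact pvA_items features

-- ===== VERDICT (by name: the statement is the Claim_ definition above) =====
theorem categorize_features_spec : Claim_equal_categorize_features := by
  intro features _
  exact pv_main features
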